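-- pv_equiv track=rewrite | github.com/RosieBaish/1b_compiler_construction | util.py | set_to_range_string
-- ===== SOURCE A (Python) =====
-- def set_to_range_string(input_set: set[str]) -> str:
--     for char in input_set:
--         assert len(char) in {0, 1}, char
--     # Work with ascii/unicode values not characters for simplicity
--     ascii_vals = sorted([ord(c) if c != "" else -1 for c in input_set])
--
--     def my_chr(c: int) -> str:
--         """Identical to chr but uses -1 for epsilon"""
--         if c == -1:
--             return "ε"
--         else:
--             return chr(c)
--
--     if len(ascii_vals) == 0:
--         return "[]"
--     elif len(ascii_vals) == 1:
--         return f"[{my_chr(ascii_vals[0])}]"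
--     groups: list[str] = []
--     current_group: list[int] = [ascii_vals[0]]
--
--     def add_current_group(current_group: list[int]) -> None:
--         if len(current_group) < 3:
--             groups.extend([my_chr(c) for c in current_group])
--         else:
--             groups.append(f"{my_chr(current_group[0])}-{my_chr(current_group[-1])}")
--
--     for c in ascii_vals[1:]:
--         if c - current_group[-1] == 1:
--             # Still contiguous
--             current_group.append(c)
--         else:
--             add_current_group(current_group)
--             current_group = [c]
--     add_current_group(current_group)
--
--     return "[" + "".join(groups) + "]"
-- ===== SOURCE B (Python) =====
-- def set_to_range_string(input_set: set[str]) -> str: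
--     for char in input_set:
--         assert len(char) in {0, 1}, char
--
--     def my_chr(c: int) -> str:
--         return "ε" if c == -1 else chr(c)
--
--     # Membership-based decomposition: a code starts a maximal run iff its
--     # predecessor is absent, and ends one iff its successor is absent; zipping
--     # the sorted starts with the sorted ends pairs up the runs directly.
--     codes = {ord(c) if c != "" else -1 for c in input_set}
--     starts = sorted(c for c in codes if c - 1 not in codes)
--     ends = sorted(c for c in codes if c + 1 not in codes)
--     frags = []
--     for s, e in zip(starts, ends):
--         if e - s >= 2:
--             frags.append(f"{my_chr(s)}-{my_chr(e)}")
--         else: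
--             frags.extend(my_chr(c) for c in range(s, e + 1))
--     return "[" + "".join(frags) + "]"
-- ===== Notes on version B (the rewrite author's own statement) =====
-- stated objective: alternative
-- what changed: B computes run boundaries by set membership (a code starts a maximal run iff code-1 is absent, ends one iff code+1 is absent), zips the sorted starts with the sorted ends and renders each (start,end) pair, instead of A's single sequential scan of the sorted codes that grows a current group and flushes it at each gap.
import Mathlib
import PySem

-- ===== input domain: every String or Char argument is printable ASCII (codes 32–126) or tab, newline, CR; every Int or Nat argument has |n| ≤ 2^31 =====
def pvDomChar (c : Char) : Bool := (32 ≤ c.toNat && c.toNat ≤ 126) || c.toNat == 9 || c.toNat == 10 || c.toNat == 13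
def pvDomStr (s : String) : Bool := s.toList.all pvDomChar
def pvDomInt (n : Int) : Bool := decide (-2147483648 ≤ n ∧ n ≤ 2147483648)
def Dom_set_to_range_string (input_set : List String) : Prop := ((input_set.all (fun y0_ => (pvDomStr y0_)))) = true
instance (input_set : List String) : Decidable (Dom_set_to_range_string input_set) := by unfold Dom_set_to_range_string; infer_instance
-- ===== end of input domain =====

-- B finds run boundaries by set membership (start ⟺ code-1 absent, end ⟺ code+1 absent) and zips
-- sorted starts with sorted ends, instead of A's sequential gap scan over the sorted codes
-- (alternative algorithm, same cost).

-- shared helpers of both ports: ord with "" ↦ -1, my_chr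
def pvMyChr (c : Int) : List Char := if c = -1 then ['ε'] else [Char.ofNat c.toNat]

def pvOrd (s : String) : Int :=
  match s.toList with
  | [] => -1
  | c :: _ => (c.toNat : Int)

-- ===== PORT A =====
def pvValsA (input_set : List String) : List Int :=
  PySem.List.sorted (input_set.map pvOrd) (fun x => x) false

-- add_current_group: the fragments one group contributes
def pvGroupFragsA (cur : List Int) : List (List Char) :=
  if cur.length < 3 then cur.map pvMyChr
  else [pvMyChr cur.head! ++ ['-'] ++ pvMyChr cur.getLast!]

-- the for-loop body over state (groups, current_group)
def pvStepA (p : List (List Char) × List Int) (c : Int) : List (List Char) × List Int :=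
  if c - p.2.getLast! = 1 then (p.1, p.2 ++ [c]) else (p.1 ++ pvGroupFragsA p.2, [c])

def pvFormatA (vals : List Int) : String :=
  match vals with
  | [] => "[]"
  | [v] => String.ofList ('[' :: pvMyChr v ++ [']'])
  | v :: rest =>
    let st := rest.foldl pvStepA ([], [v])
    let groups := st.1 ++ pvGroupFragsA st.2
    String.ofList ('[' :: groups.flatten ++ [']'])

def set_to_range_string (input_set : List String) : String :=
  pvFormatA (pvValsA input_set)

-- ===== PORT B =====
-- one zip-loop iteration: append the fragment(s) of the run (s, e)
def pvStepB (fr : List (List Char)) (p : Int × Int) : List (List Char) :=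
  if p.2 - p.1 ≥ 2 then fr ++ [pvMyChr p.1 ++ ['-'] ++ pvMyChr p.2]
  else fr ++ (PySem.List.pyRange p.1 (p.2 + 1) 1).map pvMyChr

def set_to_range_string_alt (input_set : List String) : String :=
  let codes : PySem.Set Int := PySem.Set.ofList (input_set.map pvOrd)
  let starts := PySem.List.sorted (codes.filter (fun c => !(PySem.Set.contains codes (c - 1)))) (fun x => x) false
  let ends := PySem.List.sorted (codes.filter (fun c => !(PySem.Set.contains codes (c + 1)))) (fun x => x) false
  let frags := (starts.zip ends).foldl pvStepB []
  String.ofList ('[' :: frags.flatten ++ [']'])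

-- ===== PRECONDITION & SPEC =====
-- The argument represents a Python set[str]: its elements are DISTINCT (a list with duplicates
-- encodes no set); and each element must have length ≤ 1, else A's assert raises AssertionError.
def Pre_set_to_range_string (input_set : List String) : Prop :=
  input_set.Nodup ∧ ∀ s ∈ input_set, s.toList.length ≤ 1
instance (input_set : List String) : Decidable (Pre_set_to_range_string input_set) := by
  unfold Pre_set_to_range_string; infer_instance

def pvWitness_set_to_range_string : List String := ["a", "", "b", "c", "x"]

def Spec_set_to_range_string (input_set : List String) (out : String) : Prop := out = set_to_range_string_alt input_set
instance (input_set : List String) (out : String) : Decidable (Spec_set_to_range_string input_set out) := by unfold Spec_set_to_range_string; infer_instance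

-- ===== CLAIM (what is proved, stated in full; the proofs are below) =====
def Claim_equal_set_to_range_string : Prop := ∀ (input_set : List String), Dom_set_to_range_string input_set → Pre_set_to_range_string input_set → Spec_set_to_range_string input_set (set_to_range_string input_set)

-- ===== LEMMAS AND PROOFS =====

-- proof-side description of the maximal-run decomposition of the sorted code list
def pvTakeRun (last : Int) : List Int → List Int × List Int
  | [] => ([], [])
  | c :: rest =>
    if c - last = 1 then
      let p := pvTakeRun c rest
      (c :: p.1, p.2)
    else ([], c :: rest)

theorem pvTakeRun_snd_length_le (last : Int) (xs : List Int) :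
    (pvTakeRun last xs).2.length ≤ xs.length := by
  induction xs generalizing last with
  | nil => simp [pvTakeRun]
  | cons c rest ih =>
    simp only [pvTakeRun]
    split
    · exact Nat.le_succ_of_le (ih c)
    · simp

def pvRuns : List Int → List (List Int)
  | [] => []
  | x :: xs => (x :: (pvTakeRun x xs).1) :: pvRuns (pvTakeRun x xs).2
  termination_by xs => xs.length
  decreasing_by exact Nat.lt_succ_of_le (pvTakeRun_snd_length_le x xs)

-- the fragment one run contributes (flattened form of pvGroupFragsA)
def pvFragB (r : List Int) : List Char :=
  if r.length ≥ 3 then pvMyChr r.head! ++ ['-'] ++ pvMyChr r.getLast!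
  else (r.map pvMyChr).flatten

-- integer interval s, s+1, …, s+n-1
def pvIvl (s : Int) (n : Nat) : List Int := (List.range n).map (fun (i : Nat) => s + (i : Int))

theorem pvMem_ivl (s y : Int) (n : Nat) : y ∈ pvIvl s n ↔ s ≤ y ∧ y < s + n := by
  constructor
  · intro hy
    simp only [pvIvl, List.mem_map, List.mem_range] at hy
    obtain ⟨i, hi, rfl⟩ := hy
    omega
  · intro hy
    simp only [pvIvl, List.mem_map, List.mem_range]
    exact ⟨(y - s).toNat, by omega, by omega⟩

theorem pvIvl_cons (s : Int) (n : Nat) : pvIvl s (n + 1) = s :: pvIvl (s + 1) n := by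
  simp only [pvIvl, List.range_succ_eq_map, List.map_cons, List.map_map]
  congr 1
  · simp
  · apply List.map_congr_left
    intro i _
    simp only [Function.comp_apply, Nat.succ_eq_add_one]
    push_cast
    ring

theorem pvIvl_snoc (s : Int) (n : Nat) : pvIvl s (n + 1) = pvIvl s n ++ [s + n] := by
  simp [pvIvl, List.range_succ]

theorem pvHead!_ivl (s : Int) (n : Nat) : (pvIvl s (n + 1)).head! = s := by
  rw [pvIvl_cons]; rfl

theorem pvGetLast!_ivl (s : Int) (n : Nat) : (pvIvl s (n + 1)).getLast! = s + n := by
  rw [pvIvl_snoc]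
  simp [List.getLast!_eq_getLast?_getD]

theorem pvLength_ivl (s : Int) (n : Nat) : (pvIvl s n).length = n := by
  simp [pvIvl]

-- pvTakeRun facts
theorem pvTakeRun_fst_ivl (xs : List Int) (last : Int) :
    (pvTakeRun last xs).1 = pvIvl (last + 1) (pvTakeRun last xs).1.length := by
  induction xs generalizing last with
  | nil => simp [pvTakeRun, pvIvl]
  | cons c rest ih =>
    simp only [pvTakeRun]
    split
    · next hif =>
      obtain rfl : c = last + 1 := by omega
      simp only [List.length_cons, pvIvl_cons]
      exact congrArg (fun t => (last + 1) :: t) (ih (last + 1))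
    · simp [pvIvl]

theorem pvTakeRun_append (xs : List Int) (last : Int) :
    (pvTakeRun last xs).1 ++ (pvTakeRun last xs).2 = xs := by
  induction xs generalizing last with
  | nil => simp [pvTakeRun]
  | cons c rest ih =>
    simp only [pvTakeRun]
    split
    · simpa using ih c
    · simp

theorem pvTakeRun_break (xs : List Int) (last c : Int) (t : List Int)
    (h : (pvTakeRun last xs).2 = c :: t) :
    c ≠ last + (pvTakeRun last xs).1.length + 1 := by
  induction xs generalizing last with
  | nil => simp [pvTakeRun] at h
  | cons d rest ih =>
    simp only [pvTakeRun] at h ⊢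
    split at h
    · next hd =>
      have := ih d h
      simp only [if_pos hd, List.length_cons]
      omega
    · next hd =>
      simp only [if_neg hd, List.length_nil]
      obtain ⟨rfl, rfl⟩ := by simpa using h
      omega

-- every run of pvRuns is a nonempty integer interval
theorem pvRuns_struct (L : List Int) :
    ∀ r ∈ pvRuns L, ∃ s k, r = pvIvl s (k + 1) := by
  induction L using pvRuns.induct with
  | case1 => simp [pvRuns]
  | case2 x xs ih =>
    intro r hr
    rw [pvRuns] at hr
    rcases List.mem_cons.mp hr with rfl | hr
    · refine ⟨x, (pvTakeRun x xs).1.length, ?_⟩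
      rw [pvIvl_cons]
      exact congrArg (x :: ·) (pvTakeRun_fst_ivl xs x)
    · exact ih r hr

-- decomposition facts for the head run of a sorted list
theorem pvHeadRun_ivl (x : Int) (xs : List Int) :
    x :: (pvTakeRun x xs).1 = pvIvl x ((pvTakeRun x xs).1.length + 1) := by
  rw [pvIvl_cons]
  exact congrArg (x :: ·) (pvTakeRun_fst_ivl xs x)

theorem pvRest_lo (x : Int) (xs : List Int) (h : (x :: xs).Pairwise (· < ·)) :
    ∀ c ∈ (pvTakeRun x xs).2, x + (pvTakeRun x xs).1.length + 2 ≤ c := by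
  have hp : (x :: ((pvTakeRun x xs).1 ++ (pvTakeRun x xs).2)).Pairwise (· < ·) := by
    rw [pvTakeRun_append]; exact h
  have hgt : ∀ c ∈ (pvTakeRun x xs).2, ∀ a ∈ x :: (pvTakeRun x xs).1, a < c := by
    intro c hc a ha
    rcases List.mem_cons.mp ha with rfl | ha
    · exact (List.pairwise_cons.mp hp).1 c (List.mem_append_right _ hc)
    · exact ((List.pairwise_append.mp (List.pairwise_cons.mp hp).2).2.2 a ha c hc)
  have hrestp : (pvTakeRun x xs).2.Pairwise (· < ·) :=
    ((List.pairwise_append.mp (List.pairwise_cons.mp hp).2).2.1)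
  have hlastmem : x + (pvTakeRun x xs).1.length ∈ x :: (pvTakeRun x xs).1 := by
    rw [pvHeadRun_ivl x xs, pvMem_ivl]
    omega
  intro c hc
  rcases hre : (pvTakeRun x xs).2 with _ | ⟨h0, t⟩
  · rw [hre] at hc; simp at hc
  · have hb : h0 ≠ x + (pvTakeRun x xs).1.length + 1 := pvTakeRun_break xs x h0 t hre
    have h0gt : x + (pvTakeRun x xs).1.length < h0 :=
      hgt h0 (by rw [hre]; exact List.mem_cons_self) _ hlastmem
    rw [hre] at hc
    rcases List.mem_cons.mp hc with rfl | hc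
    · omega
    · have : h0 < c := (List.pairwise_cons.mp (hre ▸ hrestp)).1 c hc
      omega

theorem pvRest_pairwise (x : Int) (xs : List Int) (h : (x :: xs).Pairwise (· < ·)) :
    (pvTakeRun x xs).2.Pairwise (· < ·) := by
  have hsub : (pvTakeRun x xs).2.Sublist (x :: xs) := by
    conv_rhs => rw [← pvTakeRun_append xs x]
    exact (List.sublist_append_right (pvTakeRun x xs).1 (pvTakeRun x xs).2).cons x
  exact h.sublist hsub

-- filter keeping exactly the head
theorem pvFilter_head (x : Int) (r : List Int) (P : Int → Bool)
    (hx : P x = true) (hr : ∀ y ∈ r, P y = false) : (x :: r).filter P = [x] := by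
  rw [List.filter_cons_of_pos hx, List.filter_eq_nil_iff.mpr (by intro a ha; simp [hr a ha])]

-- the starts filter yields the run heads
theorem pvStarts_eq (L : List Int) (h : L.Pairwise (· < ·)) :
    L.filter (fun c => !decide ((c - 1) ∈ L)) = (pvRuns L).map (·.head!) := by
  induction L using pvRuns.induct with
  | case1 => simp [pvRuns]
  | case2 x xs ih =>
    set r := (pvTakeRun x xs).1 with hr
    set rest := (pvTakeRun x xs).2 with hrest
    have hsplit : x :: xs = x :: (r ++ rest) := by rw [hr, hrest, pvTakeRun_append]
    have hivl : x :: r = pvIvl x (r.length + 1) := pvHeadRun_ivl x xs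
    have hlo : ∀ c ∈ rest, x + r.length + 2 ≤ c := pvRest_lo x xs h
    have hxr_mem : ∀ a, a ∈ x :: r ↔ (x ≤ a ∧ a ≤ x + r.length) := by
      intro a; rw [hivl, pvMem_ivl]; omega
    have hmemL : ∀ a, a ∈ x :: xs ↔ (a ∈ x :: r ∨ a ∈ rest) := by
      intro a; rw [hsplit]; simp [List.mem_append, List.mem_cons, or_assoc]
    -- the head-run part of the filter keeps exactly x
    have hfilt1 : (x :: r).filter (fun c => !decide ((c - 1) ∈ x :: xs)) = [x] := by
      apply pvFilter_head
      · have : ¬ (x - 1 ∈ x :: xs) := by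
          rw [hmemL]
          rintro (hm | hm)
          · have := (hxr_mem _).mp hm; omega
          · have := hlo _ hm; omega
        simp [this]
      · intro y hy
        have hyr : x + 1 ≤ y ∧ y ≤ x + r.length := by
          have : y ∈ pvIvl (x + 1) r.length := by rw [hr, ← pvTakeRun_fst_ivl]; exact hy
          have := (pvMem_ivl _ _ _).mp this; omega
        have : y - 1 ∈ x :: xs := by
          rw [hmemL]; left; rw [hxr_mem]; omega
        simp [this]
    -- over the remainder, membership of c-1 in L is membership in the remainder
    have hfilt2 : rest.filter (fun c => !decide ((c - 1) ∈ x :: xs))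
        = rest.filter (fun c => !decide ((c - 1) ∈ rest)) := by
      apply List.filter_congr
      intro c hc
      have hcl := hlo c hc
      have : (c - 1 ∈ x :: xs) ↔ (c - 1 ∈ rest) := by
        rw [hmemL]
        constructor
        · rintro (hm | hm)
          · have := (hxr_mem _).mp hm; omega
          · exact hm
        · exact Or.inr
      simp [this]
    calc (x :: xs).filter (fun c => !decide ((c - 1) ∈ x :: xs))
        = ((x :: r) ++ rest).filter (fun c => !decide ((c - 1) ∈ x :: xs)) := by
          rw [List.cons_append, ← hsplit]
      _ = [x] ++ rest.filter (fun c => !decide ((c - 1) ∈ rest)) := by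
          rw [List.filter_append, hfilt1, hfilt2]
      _ = (pvRuns (x :: xs)).map (·.head!) := by
          rw [pvRuns, List.map_cons, ← hrest, ih (pvRest_pairwise x xs h)]
          simp

-- the ends filter yields the run last elements
theorem pvEnds_eq (L : List Int) (h : L.Pairwise (· < ·)) :
    L.filter (fun c => !decide ((c + 1) ∈ L)) = (pvRuns L).map (fun r => r.getLast!) := by
  induction L using pvRuns.induct with
  | case1 => simp [pvRuns]
  | case2 x xs ih =>
    set r := (pvTakeRun x xs).1 with hr
    set rest := (pvTakeRun x xs).2 with hrest
    have hsplit : x :: xs = x :: (r ++ rest) := by rw [hr, hrest, pvTakeRun_append]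
    have hivl : x :: r = pvIvl x (r.length + 1) := pvHeadRun_ivl x xs
    have hlo : ∀ c ∈ rest, x + r.length + 2 ≤ c := pvRest_lo x xs h
    have hxr_mem : ∀ a, a ∈ x :: r ↔ (x ≤ a ∧ a ≤ x + r.length) := by
      intro a; rw [hivl, pvMem_ivl]; omega
    have hmemL : ∀ a, a ∈ x :: xs ↔ (a ∈ x :: r ∨ a ∈ rest) := by
      intro a; rw [hsplit]; simp [List.mem_append, List.mem_cons, or_assoc]
    -- the head-run part of the filter keeps exactly its last element x + r.length
    have hfilt1 : (x :: r).filter (fun c => !decide ((c + 1) ∈ x :: xs)) = [x + r.length] := by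
      rw [hivl]
      rw [pvIvl_snoc, List.filter_append]
      have h1 : (pvIvl x r.length).filter (fun c => !decide ((c + 1) ∈ x :: xs)) = [] := by
        rw [List.filter_eq_nil_iff]
        intro a ha
        have := (pvMem_ivl _ _ _).mp ha
        have : a + 1 ∈ x :: xs := by rw [hmemL]; left; rw [hxr_mem]; omega
        simp [this]
      have h2 : ¬ (x + (r.length : Int) + 1 ∈ x :: xs) := by
        rw [hmemL]
        rintro (hm | hm)
        · have := (hxr_mem _).mp hm; omega
        · have := hlo _ hm; omega
      rw [h1, List.nil_append]
      apply pvFilter_head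
      · simpa using h2
      · intro y hy; simp at hy
    have hfilt2 : rest.filter (fun c => !decide ((c + 1) ∈ x :: xs))
        = rest.filter (fun c => !decide ((c + 1) ∈ rest)) := by
      apply List.filter_congr
      intro c hc
      have hcl := hlo c hc
      have : (c + 1 ∈ x :: xs) ↔ (c + 1 ∈ rest) := by
        rw [hmemL]
        constructor
        · rintro (hm | hm)
          · have := (hxr_mem _).mp hm; omega
          · exact hm
        · exact Or.inr
      simp [this]
    have hlast : (x :: r).getLast! = x + r.length := by
      rw [hivl, pvGetLast!_ivl]
    calc (x :: xs).filter (fun c => !decide ((c + 1) ∈ x :: xs))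
        = ((x :: r) ++ rest).filter (fun c => !decide ((c + 1) ∈ x :: xs)) := by
          rw [List.cons_append, ← hsplit]
      _ = [x + r.length] ++ rest.filter (fun c => !decide ((c + 1) ∈ rest)) := by
          rw [List.filter_append, hfilt1, hfilt2]
      _ = (pvRuns (x :: xs)).map (fun r => r.getLast!) := by
          rw [pvRuns, List.map_cons, hlast, ← hrest, ih (pvRest_pairwise x xs h)]
          simp

-- ===== A-side: the scan loop emits exactly the run fragments =====
theorem pvFlatten_groupFrags (r : List Int) : (pvGroupFragsA r).flatten = pvFragB r := by
  unfold pvGroupFragsA pvFragB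
  rcases Nat.lt_or_ge r.length 3 with h | h
  · simp [h, Nat.not_le.mpr h]
  · simp [h, Nat.not_lt.mpr h]

theorem pvGetLast!_append_singleton (cur : List Int) (c : Int) :
    (cur ++ [c]).getLast! = c := by
  simp [List.getLast!_eq_getLast?_getD]

-- the loop invariant: A's fold produces exactly the fragments of the maximal runs
theorem pvLoop_eq (rest : List Int) : ∀ (cur : List Int) (g : List (List Char)), cur ≠ [] →
    (rest.foldl pvStepA (g, cur)).1 ++ pvGroupFragsA (rest.foldl pvStepA (g, cur)).2
      = g ++ ((cur ++ (pvTakeRun cur.getLast! rest).1) :: pvRuns (pvTakeRun cur.getLast! rest).2).flatMap pvGroupFragsA := by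
  induction rest with
  | nil => intro cur g _; simp [pvTakeRun, pvRuns]
  | cons c rest ih =>
    intro cur g hcur
    simp only [List.foldl_cons, pvStepA, pvTakeRun]
    by_cases h : c - cur.getLast! = 1
    · have h2 := ih (cur ++ [c]) g (by simp)
      rw [pvGetLast!_append_singleton] at h2
      simp only [if_pos h]
      rw [h2]
      simp
    · have := ih [c] (g ++ pvGroupFragsA cur) (by simp)
      simp only [if_neg h]
      rw [this]
      have hr : pvRuns (c :: rest)
          = (c :: (pvTakeRun c rest).1) :: pvRuns (pvTakeRun c rest).2 := by
        rw [pvRuns]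
      rw [hr]
      simp [List.getLast!_eq_getLast?_getD, List.flatMap_cons, List.append_assoc]

theorem pvFlatten_flatMap : ∀ (runs : List (List Int)),
    (runs.flatMap pvGroupFragsA).flatten = (runs.map pvFragB).flatten := by
  intro runs
  induction runs with
  | nil => rfl
  | cons r rs ih => simp [List.flatMap_cons, ih, pvFlatten_groupFrags r]

theorem pvFormat_eq (vals : List Int) :
    pvFormatA vals = String.ofList ('[' :: ((pvRuns vals).map pvFragB).flatten ++ [']']) := by
  match vals with
  | [] =>
    show "[]" = _
    simp only [pvRuns, List.map_nil, List.flatten_nil]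
    decide
  | [v] =>
    simp [pvFormatA, pvRuns, pvTakeRun, pvFragB, pvMyChr]
  | v :: c :: rest =>
    simp only [pvFormatA]
    have h := pvLoop_eq (c :: rest) [v] [] (by simp)
    simp only [List.getLast!_eq_getLast?_getD, List.getLast?_singleton, Option.getD_some] at h
    rw [h]
    have hr : pvRuns (v :: c :: rest)
        = (v :: (pvTakeRun v (c :: rest)).1) :: pvRuns (pvTakeRun v (c :: rest)).2 := by
      rw [pvRuns]
    rw [hr]
    congr 1
    simp only [List.nil_append, List.singleton_append, pvFlatten_flatMap]

-- ===== B-side: the zip loop emits the same fragments =====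
-- the fragment(s) one (start, end) pair contributes
def pvG (p : Int × Int) : List (List Char) :=
  if p.2 - p.1 ≥ 2 then [pvMyChr p.1 ++ ['-'] ++ pvMyChr p.2]
  else (PySem.List.pyRange p.1 (p.2 + 1) 1).map pvMyChr

theorem pvStepB_eq : pvStepB = (fun fr p => fr ++ pvG p) := by
  funext fr p
  unfold pvStepB pvG
  split <;> simp

theorem pvRange_eq_ivl (s : Int) (k : Nat) :
    PySem.List.pyRange s (s + k + 1) 1 = pvIvl s (k + 1) := by
  rw [PySem.List.pyRange_one, show (s + (k : Int) + 1 - s).toNat = k + 1 from by omega]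
  rfl

theorem pvFrag_of_ivl (s : Int) (k : Nat) :
    (pvG ((pvIvl s (k + 1)).head!, (pvIvl s (k + 1)).getLast!)).flatten
      = pvFragB (pvIvl s (k + 1)) := by
  rw [pvHead!_ivl, pvGetLast!_ivl]
  unfold pvG pvFragB
  rcases Nat.lt_or_ge k 2 with hk | hk
  · have h1 : ¬ (s + (k : Int) - s ≥ 2) := by omega
    have h2 : ¬ ((pvIvl s (k + 1)).length ≥ 3) := by rw [pvLength_ivl]; omega
    rw [if_neg h1, if_neg h2]
    rw [pvRange_eq_ivl]
  · have h1 : s + (k : Int) - s ≥ 2 := by omega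
    have h2 : (pvIvl s (k + 1)).length ≥ 3 := by rw [pvLength_ivl]; omega
    rw [if_pos h1, if_pos h2, pvHead!_ivl, pvGetLast!_ivl]
    simp

theorem pvZipFold (runs : List (List Int)) (hs : ∀ r ∈ runs, ∃ s k, r = pvIvl s (k + 1)) :
    ((runs.map (fun r => (r.head!, r.getLast!))).flatMap pvG).flatten
      = (runs.map pvFragB).flatten := by
  induction runs with
  | nil => rfl
  | cons r rs ih =>
    obtain ⟨s, k, rfl⟩ := hs r List.mem_cons_self
    simp only [List.map_cons, List.flatMap_cons, List.flatten_append]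
    rw [pvFrag_of_ivl, ih (fun r hr => hs r (List.mem_cons_of_mem _ hr))]
    rfl

-- ===== Pre_-side: the code list of a set of length-≤1 strings has no duplicates =====
theorem pvOrd_cases (u : String) (hu : u.toList.length ≤ 1) :
    (u.toList = [] ∧ pvOrd u = -1) ∨ (∃ c, u.toList = [c] ∧ pvOrd u = (c.toNat : Int)) := by
  unfold pvOrd
  match h : u.toList with
  | [] => exact Or.inl ⟨rfl, rfl⟩
  | [c] => exact Or.inr ⟨c, rfl, rfl⟩
  | c :: d :: t => rw [h] at hu; simp at hu

theorem pvM_nodup (input_set : List String) (h : Pre_set_to_range_string input_set) :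
    (input_set.map pvOrd).Nodup := by
  refine List.Nodup.map_on ?_ h.1
  intro s hs t ht heq
  rcases pvOrd_cases s (h.2 s hs) with ⟨hs1, hs2⟩ | ⟨c, hs1, hs2⟩ <;>
    rcases pvOrd_cases t (h.2 t ht) with ⟨ht1, ht2⟩ | ⟨d, ht1, ht2⟩
  · exact String.toList_inj.mp (hs1.trans ht1.symm)
  · rw [hs2, ht2] at heq; omega
  · rw [hs2, ht2] at heq; omega
  · rw [hs2, ht2] at heq
    have hcd : c = d := by
      have := congrArg Char.ofNat (by omega : c.toNat = d.toNat)
      simpa [Char.ofNat_toNat] using this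
    exact String.toList_inj.mp (by rw [hs1, ht1, hcd])

-- ===== assembling the equivalence =====
theorem pvAlt_eq (input_set : List String) (h : Pre_set_to_range_string input_set) :
    set_to_range_string_alt input_set
      = String.ofList ('[' :: ((pvRuns (pvValsA input_set)).map pvFragB).flatten ++ [']']) := by
  have hnd : (input_set.map pvOrd).Nodup := pvM_nodup input_set h
  have hofl : PySem.Set.ofList (input_set.map pvOrd) = input_set.map pvOrd :=
    PySem.Set.ofList_eq_self_of_nodup _ hnd
  have hpw : (pvValsA input_set).Pairwise (· < ·) := by
    unfold pvValsA
    rw [← hofl]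
    exact PySem.List.sorted_ofList_pairwise_lt (input_set.map pvOrd)
  have hperm : (pvValsA input_set).Perm (input_set.map pvOrd) :=
    PySem.List.sorted_perm _ _ _
  -- filters over the raw code list, with membership read off the sorted list
  have hpredS : (input_set.map pvOrd).filter
        (fun c => !(PySem.Set.contains (input_set.map pvOrd) (c - 1)))
      = (input_set.map pvOrd).filter (fun c => !decide ((c - 1) ∈ pvValsA input_set)) := by
    apply List.filter_congr
    intro c _
    rw [PySem.Set.contains_eq_listContains, List.contains_eq_mem]
    have : ((c - 1) ∈ input_set.map pvOrd) ↔ ((c - 1) ∈ pvValsA input_set) := by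
      unfold pvValsA; rw [PySem.List.mem_sorted]
    simp [this]
  have hpredE : (input_set.map pvOrd).filter
        (fun c => !(PySem.Set.contains (input_set.map pvOrd) (c + 1)))
      = (input_set.map pvOrd).filter (fun c => !decide ((c + 1) ∈ pvValsA input_set)) := by
    apply List.filter_congr
    intro c _
    rw [PySem.Set.contains_eq_listContains, List.contains_eq_mem]
    have : ((c + 1) ∈ input_set.map pvOrd) ↔ ((c + 1) ∈ pvValsA input_set) := by
      unfold pvValsA; rw [PySem.List.mem_sorted]
    simp [this]
  -- sorting the filtered raw list is filtering the sorted list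
  have hsortF : ∀ p : Int → Bool,
      PySem.List.sorted ((input_set.map pvOrd).filter p) (fun x => x) false
        = (pvValsA input_set).filter p := by
    intro p
    exact PySem.List.sorted_eq_of_perm_of_pairwise_lt _ _ _ (hperm.filter p) (hpw.filter p)
  have hstarts : PySem.List.sorted
        (((PySem.Set.ofList (input_set.map pvOrd)) : List Int).filter
          (fun c => !(PySem.Set.contains (PySem.Set.ofList (input_set.map pvOrd)) (c - 1))))
        (fun x => x) false
      = (pvRuns (pvValsA input_set)).map (·.head!) := by
    rw [show (((PySem.Set.ofList (input_set.map pvOrd)) : List Int).filter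
          (fun c => !(PySem.Set.contains (PySem.Set.ofList (input_set.map pvOrd)) (c - 1))))
        = (input_set.map pvOrd).filter (fun c => !decide ((c - 1) ∈ pvValsA input_set)) from by
      rw [hofl, hpredS]]
    rw [hsortF, pvStarts_eq _ hpw]
  have hends : PySem.List.sorted
        (((PySem.Set.ofList (input_set.map pvOrd)) : List Int).filter
          (fun c => !(PySem.Set.contains (PySem.Set.ofList (input_set.map pvOrd)) (c + 1))))
        (fun x => x) false
      = (pvRuns (pvValsA input_set)).map (fun r => r.getLast!) := by
    rw [show (((PySem.Set.ofList (input_set.map pvOrd)) : List Int).filter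
          (fun c => !(PySem.Set.contains (PySem.Set.ofList (input_set.map pvOrd)) (c + 1))))
        = (input_set.map pvOrd).filter (fun c => !decide ((c + 1) ∈ pvValsA input_set)) from by
      rw [hofl, hpredE]]
    rw [hsortF, pvEnds_eq _ hpw]
  show String.ofList ('[' :: (List.foldl pvStepB [] _).flatten ++ [']']) = _
  rw [hstarts, hends, List.zip_map', pvStepB_eq, PySem.List.foldl_append_eq_flatMap,
    List.nil_append, List.flatMap_map]
  have hz := pvZipFold (pvRuns (pvValsA input_set)) (pvRuns_struct (pvValsA input_set))
  rw [List.flatMap_map] at hz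
  rw [hz]

-- ===== VERDICT (by name: the statement is the Claim_ definition above) =====
theorem set_to_range_string_spec : Claim_equal_set_to_range_string := by
  intro input_set _ hpre
  unfold Spec_set_to_range_string set_to_range_string
  rw [pvFormat_eq, pvAlt_eq input_set hpre]
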